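-- pv_equiv track=rewrite | github.com/ChrisCruze/Leo | v2/pipeline/step2_event_selection.py | filter_public_events
-- ===== SOURCE A (Python) =====
-- def filter_public_events(events):
--     """
--     Filter events to keep only public events (type == "public").
--
--     Args:
--         events: List of event dictionaries
--
--     Returns:
--         Tuple of (filtered_events, statistics_dict)
--         statistics_dict contains:
--         - total_events: int
--         - private_events: int
--         - missing_type_events: int
--         - filtered_count: int
--     """
--     total_events = len(events)
--
--     filtered_events = []
--     private_events = 0
--     missing_type_events = 0
--
--     for event in events:
--         event_type = event.get('type')
--
--         if not event_type:
--             missing_type_events += 1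
--             continue
--
--         if event_type == 'public':
--             filtered_events.append(event)
--         else:
--             private_events += 1
--
--     statistics = {
--         'total_events': total_events,
--         'private_events': private_events,
--         'missing_type_events': missing_type_events,
--         'filtered_count': len(filtered_events)
--     }
--
--     return filtered_events, statistics
-- ===== SOURCE B (Python) =====
-- def filter_public_events(events):
--     filtered_events = [e for e in events if e.get('type') == 'public']
--     missing_type_events = sum(1 for e in events if not e.get('type'))
--     total_events = len(events)
--     statistics = {
--         'total_events': total_events,
--         'private_events': total_events - len(filtered_events) - missing_type_events,
--         'missing_type_events': missing_type_events,
--         'filtered_count': len(filtered_events),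
--     }
--     return filtered_events, statistics
-- ===== Notes on version B (the rewrite author's own statement) =====
-- stated objective: simpler
-- what changed: Replaces the stateful loop with three counters by a filter comprehension plus a falsy-type count, deriving private_events arithmetically as total - filtered - missing.
import Mathlib
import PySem

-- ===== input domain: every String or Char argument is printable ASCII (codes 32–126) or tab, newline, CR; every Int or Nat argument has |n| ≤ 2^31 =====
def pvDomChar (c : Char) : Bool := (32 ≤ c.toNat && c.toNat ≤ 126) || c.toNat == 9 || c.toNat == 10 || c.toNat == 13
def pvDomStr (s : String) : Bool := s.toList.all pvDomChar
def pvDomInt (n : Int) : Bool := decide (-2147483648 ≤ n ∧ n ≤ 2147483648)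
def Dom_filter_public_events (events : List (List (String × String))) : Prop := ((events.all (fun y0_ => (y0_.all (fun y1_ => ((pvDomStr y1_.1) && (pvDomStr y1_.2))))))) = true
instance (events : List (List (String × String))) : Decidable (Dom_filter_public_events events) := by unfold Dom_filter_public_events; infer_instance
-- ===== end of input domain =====

-- B replaces A's three-counter loop by a filter plus a falsy count, deriving private_events arithmetically (objective: simpler).


-- ===== PORT A =====
-- one step of A's loop over the state (filtered_events, private_events, missing_type_events)
def fpeStep (st : List (List (String × String)) × Int × Int) (event : List (String × String)) :
    List (List (String × String)) × Int × Int :=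
  let event_type := (PySem.Dict.mk event).get? "type"
  if event_type = none ∨ event_type = some "" then      -- `if not event_type:` (None or empty string)
    (st.1, st.2.1, st.2.2 + 1)
  else if event_type = some "public" then
    (st.1 ++ [event], st.2.1, st.2.2)
  else
    (st.1, st.2.1 + 1, st.2.2)

def filter_public_events (events : List (List (String × String))) :
    (List (List (String × String))) × (List (String × Int)) :=
  let total_events : Int := events.length
  let st := events.foldl fpeStep ([], 0, 0)
  (st.1,
    [("total_events", total_events),
     ("private_events", st.2.1),
     ("missing_type_events", st.2.2),
     ("filtered_count", (st.1.length : Int))])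

-- ===== PORT B =====
def fpeIsPublic (e : List (String × String)) : Bool := (PySem.Dict.mk e).get? "type" == some "public"

def fpeIsMissing (e : List (String × String)) : Bool :=
  match (PySem.Dict.mk e).get? "type" with
  | none => true
  | some s => s == ""

def filter_public_events_alt (events : List (List (String × String))) :
    (List (List (String × String))) × (List (String × Int)) :=
  let filtered_events := events.filter fpeIsPublic
  let missing_type_events : Int := events.countP fpeIsMissing
  let total_events : Int := events.length
  (filtered_events,
    [("total_events", total_events),
     ("private_events", total_events - filtered_events.length - missing_type_events),
     ("missing_type_events", missing_type_events),
     ("filtered_count", (filtered_events.length : Int))])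

-- ===== PRECONDITION & SPEC =====
def Spec_filter_public_events (events : List (List (String × String))) (out : (List (List (String × String))) × (List (String × Int))) : Prop := out = filter_public_events_alt events
instance (events : List (List (String × String))) (out : (List (List (String × String))) × (List (String × Int))) : Decidable (Spec_filter_public_events events out) := by unfold Spec_filter_public_events; infer_instance

-- ===== CLAIM (what is proved, stated in full; the proofs are below) =====
def Claim_equal_filter_public_events : Prop := ∀ (events : List (List (String × String))), Dom_filter_public_events events → Spec_filter_public_events events (filter_public_events events)

-- ===== LEMMAS AND PROOFS =====

-- loop invariant of A's fold: starting from (acc, p, m) it appends the public events and adds the two counts,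
-- private count expressed arithmetically as total − public − missing
lemma fpe_foldl_inv (events : List (List (String × String)))
    (acc : List (List (String × String))) (p m : Int) :
    events.foldl fpeStep (acc, p, m) =
      (acc ++ events.filter fpeIsPublic,
       p + ((events.length : Int) - (events.filter fpeIsPublic).length - events.countP fpeIsMissing),
       m + events.countP fpeIsMissing) := by
  induction events generalizing acc p m with
  | nil => simp
  | cons e es ih =>
    simp only [List.foldl_cons, fpeStep, List.filter_cons, List.countP_cons, List.length_cons]
    by_cases h1 : (PySem.Dict.mk e).get? "type" = none ∨ (PySem.Dict.mk e).get? "type" = some ""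
    · have hm : fpeIsMissing e = true := by
        unfold fpeIsMissing; rcases h1 with h | h <;> simp [h]
      have hp : fpeIsPublic e = false := by
        unfold fpeIsPublic; rcases h1 with h | h <;> simp [h]
      simp only [if_pos h1, ih, hm, hp]
      simp only [Prod.mk.injEq]; refine ⟨rfl, ?_, ?_⟩ <;> push_cast [List.length_cons] <;> ring
    · by_cases h2 : (PySem.Dict.mk e).get? "type" = some "public"
      · have hm : fpeIsMissing e = false := by unfold fpeIsMissing; simp [h2]
        have hp : fpeIsPublic e = true := by unfold fpeIsPublic; simp [h2]
        simp only [if_neg h1, if_pos h2, ih, hm, hp]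
        simp only [Prod.mk.injEq]; refine ⟨by simp, ?_, ?_⟩ <;> push_cast [List.length_cons] <;> ring
      · have hm : fpeIsMissing e = false := by
          unfold fpeIsMissing
          cases hc : (PySem.Dict.mk e).get? "type" with
          | none => exact absurd (Or.inl hc) h1
          | some s =>
            simp only [beq_eq_false_iff_ne, ne_eq]
            intro hs; exact h1 (Or.inr (hs ▸ hc))
        have hp : fpeIsPublic e = false := by unfold fpeIsPublic; simp [h2]
        simp only [if_neg h1, if_neg h2, ih, hm, hp]
        simp only [Prod.mk.injEq]; refine ⟨rfl, ?_, ?_⟩ <;> push_cast [List.length_cons] <;> ring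

-- ===== VERDICT (by name: the statement is the Claim_ definition above) =====
theorem filter_public_events_spec : Claim_equal_filter_public_events := by
  intro events _
  unfold Spec_filter_public_events filter_public_events filter_public_events_alt
  simp [fpe_foldl_inv]
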